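-- pv_equiv track=rewrite | github.com/zephanrs/hammer-sim | scripts/generate_kernel.py | find_assignment_index
-- ===== SOURCE A (Python) =====
-- def find_assignment_index(stmt: str):
--     depth = 0
--     in_string = False
--     string_char = ''
--     for i, ch in enumerate(stmt):
--         prev = stmt[i - 1] if i > 0 else ''
--         nxt = stmt[i + 1] if i + 1 < len(stmt) else ''
--         if in_string:
--             if ch == '\\':
--                 continue
--             if ch == string_char and prev != '\\':
--                 in_string = False
--             continue
--         if ch in ('"', "'"):
--             in_string = True
--             string_char = ch
--             continue
--         if ch in '([{':
--             depth += 1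
--             continue
--         if ch in ')]}':
--             depth = max(depth - 1, 0)
--             continue
--         if ch != '=' or depth != 0:
--             continue
--         if prev in '=!<>+-*/%&|^' or nxt == '=':
--             continue
--         return i
--     return None
-- ===== SOURCE B (Python) =====
-- _OPS = '=!<>+-*/%&|^'
--
-- def find_assignment_index(stmt: str):
--     # pass 1: table of (bracket depth, in_string) state BEFORE each character
--     states = []
--     depth, in_str, qc, prev = 0, False, '', ''
--     for ch in stmt:
--         states.append((depth, in_str))
--         if in_str:
--             if ch != '\\' and ch == qc and prev != '\\':
--                 in_str = False
--         elif ch in '"\'':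
--             in_str, qc = True, ch
--         elif ch in '([{':
--             depth += 1
--         elif ch in ')]}':
--             depth = max(depth - 1, 0)
--         prev = ch
--     # pass 2: first '=' that is top-level, outside strings, and not part of an operator
--     for i, (d, s) in enumerate(states):
--         if stmt[i] == '=' and d == 0 and not s:
--             if not (i == 0 or stmt[i - 1] in _OPS or stmt[i + 1:i + 2] == '='):
--                 return i
--     return None
-- ===== Notes on version B (the rewrite author's own statement) =====
-- stated objective: alternative
-- what changed: Replaced A's single early-returning loop by a two-pass shape: pass 1 builds a table of (bracket depth, in_string) state before each character, pass 2 scans that table for the first qualifying '='.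
import Mathlib
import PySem

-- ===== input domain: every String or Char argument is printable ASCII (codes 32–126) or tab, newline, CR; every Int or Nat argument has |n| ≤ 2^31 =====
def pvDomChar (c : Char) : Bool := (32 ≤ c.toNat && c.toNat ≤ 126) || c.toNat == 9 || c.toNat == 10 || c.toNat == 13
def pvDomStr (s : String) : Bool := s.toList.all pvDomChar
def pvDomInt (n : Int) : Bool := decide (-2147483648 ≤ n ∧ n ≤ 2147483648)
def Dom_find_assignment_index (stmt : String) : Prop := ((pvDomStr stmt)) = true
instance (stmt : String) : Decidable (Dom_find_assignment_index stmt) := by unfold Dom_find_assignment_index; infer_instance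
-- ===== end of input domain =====

-- B replaces A's single early-returning scan by a two-pass shape (state table, then scan); alternative decomposition, same cost.

-- ===== PORT A =====
-- the operator characters of the Python literal '=!<>+-*/%&|^'
def pvOps : List Char := ['=', '!', '<', '>', '+', '-', '*', '/', '%', '&', '|', '^']

-- Python's `prev in '=!<>+-*/%&|^'` where prev is '' (none) or a single char; '' in s is True in Python
def pvPrevIn (prev : Option Char) : Bool :=
  match prev with
  | none => true
  | some c => pvOps.contains c

-- the for-loop of A: i is the current index, the List Char argument is stmt[i:], state (depth, inStr, sc)
def pvLoopA (cs : List Char) : Nat → List Char → Int → Bool → Option Char → Option Int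
  | _, [], _, _, _ => none
  | i, ch :: rest, depth, inStr, sc =>
    let prev : Option Char := if i > 0 then cs[i - 1]? else none
    let nxt : Option Char := cs[i + 1]?
    if inStr then
      if ch = '\\' then pvLoopA cs (i + 1) rest depth inStr sc
      else if some ch = sc ∧ prev ≠ some '\\' then pvLoopA cs (i + 1) rest depth false sc
      else pvLoopA cs (i + 1) rest depth inStr sc
    else if ch = '"' ∨ ch = '\'' then pvLoopA cs (i + 1) rest depth true (some ch)
    else if ch = '(' ∨ ch = '[' ∨ ch = '{' then pvLoopA cs (i + 1) rest (depth + 1) inStr sc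
    else if ch = ')' ∨ ch = ']' ∨ ch = '}' then pvLoopA cs (i + 1) rest (max (depth - 1) 0) inStr sc
    else if ch ≠ '=' ∨ depth ≠ 0 then pvLoopA cs (i + 1) rest depth inStr sc
    else if pvPrevIn prev = true ∨ nxt = some '=' then pvLoopA cs (i + 1) rest depth inStr sc
    else some (i : Int)

def find_assignment_index (stmt : String) : Option Int :=
  pvLoopA stmt.toList 0 stmt.toList 0 false none

-- ===== PORT B =====
-- pass 1 of Source B: the (depth, in_string) state BEFORE each character; prev/qc as Option Char (none = '')
def pvPass1 : List Char → Option Char → Int → Bool → Option Char → List (Int × Bool)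
  | [], _, _, _, _ => []
  | ch :: rest, prev, depth, inStr, qc =>
    (depth, inStr) ::
    (if inStr then
       if ch ≠ '\\' ∧ some ch = qc ∧ prev ≠ some '\\' then pvPass1 rest (some ch) depth false qc
       else pvPass1 rest (some ch) depth inStr qc
     else if ch = '"' ∨ ch = '\'' then pvPass1 rest (some ch) depth true (some ch)
     else if ch = '(' ∨ ch = '[' ∨ ch = '{' then pvPass1 rest (some ch) (depth + 1) inStr qc
     else if ch = ')' ∨ ch = ']' ∨ ch = '}' then pvPass1 rest (some ch) (max (depth - 1) 0) inStr qc
     else pvPass1 rest (some ch) depth inStr qc)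

-- pass 2 of Source B; stmt[i+1:i+2] == '=' ⟺ the char at i+1 exists and is '=' (the slice has length ≤ 1)
def pvPass2 (cs : List Char) : Nat → List (Int × Bool) → Option Int
  | _, [] => none
  | i, (d, s) :: rest =>
    if cs[i]? = some '=' ∧ d = 0 ∧ s = false then
      if i = 0 ∨ (cs[i - 1]?).any pvOps.contains = true ∨ cs[i + 1]? = some '=' then
        pvPass2 cs (i + 1) rest
      else some (i : Int)
    else pvPass2 cs (i + 1) rest

def find_assignment_index_alt (stmt : String) : Option Int :=
  pvPass2 stmt.toList 0 (pvPass1 stmt.toList none 0 false none)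

-- ===== PRECONDITION & SPEC =====
def Spec_find_assignment_index (stmt : String) (out : Option Int) : Prop := out = find_assignment_index_alt stmt
instance (stmt : String) (out : Option Int) : Decidable (Spec_find_assignment_index stmt out) := by unfold Spec_find_assignment_index; infer_instance

-- ===== CLAIM (what is proved, stated in full; the proofs are below) =====
def Claim_equal_find_assignment_index : Prop := ∀ (stmt : String), Dom_find_assignment_index stmt → Spec_find_assignment_index stmt (find_assignment_index stmt)

-- ===== LEMMAS AND PROOFS =====

-- A's loop from position i equals B's scan of the table built from the same state
theorem pvMain (rest : List Char) : ∀ (cs : List Char) (i : Nat) (depth : Int) (inStr : Bool) (sc : Option Char),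
    cs.drop i = rest →
    pvLoopA cs i rest depth inStr sc =
      pvPass2 cs i (pvPass1 rest (if i > 0 then cs[i - 1]? else none) depth inStr sc) := by
  induction rest with
  | nil => intro cs i depth inStr sc _; simp [pvLoopA, pvPass1, pvPass2]
  | cons ch rest ih =>
    intro cs i depth inStr sc hdrop
    have hget : cs[i]? = some ch := by
      have h : (ch :: rest).head? = cs[i]? := by rw [← hdrop]; exact List.head?_drop
      simpa using h.symm
    have hlen : i < cs.length := (List.getElem?_eq_some_iff.mp hget).1
    have hdrop' : cs.drop (i + 1) = rest := by
      have : List.drop 1 (cs.drop i) = List.drop 1 (ch :: rest) := by rw [hdrop]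
      simpa [List.drop_drop, Nat.add_comm] using this
    have hprev' : (if i + 1 > 0 then cs[(i + 1) - 1]? else none) = some ch := by
      simp [hget]
    have hprevIn : pvPrevIn (if i > 0 then cs[i - 1]? else none) = true ↔
        (i = 0 ∨ (cs[i - 1]?).any pvOps.contains = true) := by
      rcases Nat.eq_zero_or_pos i with h0 | h0
      · simp [h0, pvPrevIn]
      · have hlt : i - 1 < cs.length := by omega
        have hc : cs[i - 1]? = some cs[i - 1] := List.getElem?_eq_getElem hlt
        simp [h0, Nat.pos_iff_ne_zero.mp h0, hc, pvPrevIn]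
    cases inStr with
    | true =>
      by_cases hb : ch = '\\'
      · have h := ih cs (i + 1) depth true sc hdrop'
        rw [hprev'] at h
        simpa [pvLoopA, pvPass1, pvPass2, hb] using h
      · by_cases hc : some ch = sc ∧ (0 < i → ¬cs[i - 1]? = some '\\')
        · have h := ih cs (i + 1) depth false sc hdrop'
          rw [hprev'] at h
          simpa [pvLoopA, pvPass1, pvPass2, hb, hc.1, eq_true hc.2] using h
        · have h := ih cs (i + 1) depth true sc hdrop'
          rw [hprev'] at h
          simpa [pvLoopA, pvPass1, pvPass2, hb, hc] using h
    | false =>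
      by_cases hq : ch = '"' ∨ ch = '\''
      · have h := ih cs (i + 1) depth true (some ch) hdrop'
        rw [hprev'] at h
        rcases hq with hq | hq <;> subst hq <;>
          simpa [pvLoopA, pvPass1, pvPass2, hget] using h
      · by_cases ho : ch = '(' ∨ ch = '[' ∨ ch = '{'
        · have h := ih cs (i + 1) (depth + 1) false sc hdrop'
          rw [hprev'] at h
          rcases ho with ho | ho | ho <;> subst ho <;>
            simpa [pvLoopA, pvPass1, pvPass2, hq, hget] using h
        · by_cases hcl : ch = ')' ∨ ch = ']' ∨ ch = '}'
          · have h := ih cs (i + 1) (max (depth - 1) 0) false sc hdrop'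
            rw [hprev'] at h
            rcases hcl with hcl | hcl | hcl <;> subst hcl <;>
              simpa [pvLoopA, pvPass1, pvPass2, hq, ho, hget] using h
          · by_cases he : ch ≠ '=' ∨ depth ≠ 0
            · have h := ih cs (i + 1) depth false sc hdrop'
              rw [hprev'] at h
              rcases he with he | he <;>
                simpa [pvLoopA, pvPass1, pvPass2, hq, ho, hcl, hget, he] using h
            · simp only [not_or, not_not] at he
              obtain ⟨he1, he2⟩ := he
              subst he1; subst he2
              by_cases hg : pvPrevIn (if i > 0 then cs[i - 1]? else none) = true ∨ cs[i + 1]? = some '='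
              · have h := ih cs (i + 1) 0 false sc hdrop'
                rw [hprev'] at h
                have hg' : i = 0 ∨ (cs[i - 1]?).any pvOps.contains = true ∨ cs[i + 1]? = some '=' := by
                  rcases hg with hg | hg
                  · rcases hprevIn.mp hg with h0 | h0
                    · exact Or.inl h0
                    · exact Or.inr (Or.inl h0)
                  · exact Or.inr (Or.inr hg)
                simpa [pvLoopA, pvPass1, pvPass2, hq, ho, hcl, hget, hg, hg'] using h
              · simp only [not_or] at hg
                have hg1 : i ≠ 0 := fun h0 => hg.1 (hprevIn.mpr (Or.inl h0))
                have hg2 : ¬ (cs[i - 1]?).any pvOps.contains = true :=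
                  fun h0 => hg.1 (hprevIn.mpr (Or.inr h0))
                simp [pvLoopA, pvPass1, pvPass2, hget, hg.1, hg.2, hg1, hg2]

theorem pv_equiv (stmt : String) : find_assignment_index stmt = find_assignment_index_alt stmt := by
  unfold find_assignment_index find_assignment_index_alt
  have h := pvMain stmt.toList stmt.toList 0 0 false none (by simp)
  simpa using h

-- ===== VERDICT (by name: the statement is the Claim_ definition above) =====
theorem find_assignment_index_spec : Claim_equal_find_assignment_index := by
  intro stmt _
  unfold Spec_find_assignment_index
  exact pv_equiv stmt
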